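-- pv_equiv track=rewrite | github.com/dnstjr4567/cote | 13주차.py | solution
-- ===== SOURCE A (Python) =====
-- def solution(n):
--     if n==1 or n==0:
--         return n
--     fibo = [0]*(n+1)
--     fibo[0] = 0
--     fibo[1] = 1
--     fibo[2] = 2
--     for i in range(3,n+1):
--         fibo[i] = fibo[i-1]+fibo[i-2]
--     answer = fibo[n]%1234567
--     return answer
-- ===== SOURCE B (Python) =====
-- M = 1234567
--
--
-- def _fib_pair(k):
--     # returns (F(k) % M, F(k+1) % M) by fast doubling, F(0)=0, F(1)=1
--     if k == 0:
--         return (0, 1)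
--     a, b = _fib_pair(k // 2)
--     c = a * (2 * b - a) % M
--     d = (a * a + b * b) % M
--     if k % 2 == 0:
--         return (c, d)
--     else:
--         return (d, (c + d) % M)
--
--
-- def solution(n):
--     if n == 1 or n == 0:
--         return n
--     return _fib_pair(n + 1)[0]
-- ===== Notes on version B (the rewrite author's own statement) =====
-- stated objective: faster
-- what changed: Replaced the O(n) table-filling Fibonacci loop (which keeps all n+1 unreduced big integers) by fast-doubling recursion with all arithmetic reduced mod 1234567, computing the same value in O(log n) steps.
import Mathlib
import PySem

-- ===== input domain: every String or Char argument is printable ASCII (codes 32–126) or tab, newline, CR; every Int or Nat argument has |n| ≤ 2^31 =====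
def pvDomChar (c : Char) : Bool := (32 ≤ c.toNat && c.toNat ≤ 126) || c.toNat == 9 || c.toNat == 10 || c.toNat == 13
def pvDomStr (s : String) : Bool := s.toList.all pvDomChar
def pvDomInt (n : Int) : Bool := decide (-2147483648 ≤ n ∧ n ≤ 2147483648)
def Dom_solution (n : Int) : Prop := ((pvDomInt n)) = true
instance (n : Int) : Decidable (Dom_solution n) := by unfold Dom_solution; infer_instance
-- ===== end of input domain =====

-- B replaces A's O(n) unreduced Fibonacci table by fast-doubling recursion mod 1234567 (faster, asymptotic).


-- ===== PORT A =====
-- literal port of A: build the table [0]*(n+1) (an Array, matching Python's O(1)-indexed list),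
-- seed indices 0,1,2, fill left to right, finally take fibo[n] % 1234567.  Under Pre_ every
-- index is nonnegative and in range, so setIfInBounds/getD are exact there.
def solution (n : Int) : Int :=
  if n == 1 || n == 0 then n
  else
    let fibo : Array Int := Array.replicate (n + 1).toNat 0
    let fibo := fibo.setIfInBounds 0 0
    let fibo := fibo.setIfInBounds 1 1
    let fibo := fibo.setIfInBounds 2 2
    let fibo := (PySem.List.pyRange 3 (n + 1) 1).foldl
      (fun a i => a.setIfInBounds i.toNat (a.getD (i - 1).toNat 0 + a.getD (i - 2).toNat 0)) fibo
    PySem.Int.mod (fibo.getD n.toNat 0) 1234567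

-- ===== PORT B =====
-- fast doubling: fibPair k = (F(k) % M, F(k+1) % M); under Pre_, n+1 ≥ 0 so toNat is exact.
def fibPair (k : Nat) : Int × Int :=
  if h : k = 0 then (0, 1)
  else
    let p := fibPair (k / 2)
    let c := PySem.Int.mod (p.1 * (2 * p.2 - p.1)) 1234567
    let d := PySem.Int.mod (p.1 * p.1 + p.2 * p.2) 1234567
    if k % 2 = 0 then (c, d) else (d, PySem.Int.mod (c + d) 1234567)
decreasing_by exact Nat.div_lt_self (Nat.pos_of_ne_zero h) (by norm_num)

def solution_alt (n : Int) : Int :=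
  if n == 1 || n == 0 then n
  else (fibPair (n + 1).toNat).1

-- ===== PRECONDITION & SPEC =====
-- Pre_ excludes n < 0, where A raises IndexError (fibo[0] on an empty list).
def Pre_solution (n : Int) : Prop := 0 ≤ n
instance (n : Int) : Decidable (Pre_solution n) := by unfold Pre_solution; infer_instance
def pvWitness_solution : Int := 7

def Spec_solution (n : Int) (out : Int) : Prop := out = solution_alt n
instance (n : Int) (out : Int) : Decidable (Spec_solution n out) := by unfold Spec_solution; infer_instance

-- ===== CLAIM (what is proved, stated in full; the proofs are below) =====
def Claim_equal_solution : Prop := ∀ (n : Int), Dom_solution n → Pre_solution n → Spec_solution n (solution n)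

-- ===== LEMMAS AND PROOFS =====

-- the intended content of A's table: fibo[0] = 0 and fibo[i] = F(i+1) for i ≥ 1
def fibV (i : Nat) : Int := if i = 0 then 0 else (Nat.fib (i + 1) : Int)

theorem fibPair_eq (k : Nat) :
    fibPair k = ((Nat.fib k : Int) % 1234567, (Nat.fib (k + 1) : Int) % 1234567) := by
  induction k using Nat.strong_induction_on with
  | _ k ih =>
    by_cases h0 : k = 0
    · subst h0; rw [fibPair]; norm_num
    · have ih2 := ih (k / 2) (Nat.div_lt_self (Nat.pos_of_ne_zero h0) one_lt_two)
      rw [fibPair]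
      simp only [dif_neg h0, ih2]
      set m := k / 2 with hmdef
      set M : Int := 1234567 with hM
      have hMpos : (0 : Int) < M := by rw [hM]; norm_num
      have hma : (Nat.fib m : Int) % M ≡ (Nat.fib m : Int) [ZMOD M] := Int.mod_modEq _ _
      have hmb : (Nat.fib (m + 1) : Int) % M ≡ (Nat.fib (m + 1) : Int) [ZMOD M] := Int.mod_modEq _ _
      -- the two doubling identities, cast to Int
      have hfib2 : (Nat.fib (2 * m) : Int) =
          (Nat.fib m : Int) * (2 * (Nat.fib (m + 1) : Int) - (Nat.fib m : Int)) := by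
        have h := Nat.fib_two_mul m
        have hle : Nat.fib m ≤ 2 * Nat.fib (m + 1) :=
          le_trans (Nat.fib_le_fib_succ) (by omega)
        zify [hle] at h
        exact h
      have hfib21 : (Nat.fib (2 * m + 1) : Int) =
          (Nat.fib m : Int) * (Nat.fib m : Int) +
          (Nat.fib (m + 1) : Int) * (Nat.fib (m + 1) : Int) := by
        have h := Nat.fib_two_mul_add_one m
        push_cast [h]; ring
      have hc : PySem.Int.mod ((Nat.fib m : Int) % M *
            (2 * ((Nat.fib (m + 1) : Int) % M) - (Nat.fib m : Int) % M)) M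
          = (Nat.fib (2 * m) : Int) % M := by
        rw [PySem.Int.mod_eq_emod_of_pos hMpos, hfib2]
        exact hma.mul (((Int.ModEq.refl 2).mul hmb).sub hma)
      have hd : PySem.Int.mod ((Nat.fib m : Int) % M * ((Nat.fib m : Int) % M) +
            (Nat.fib (m + 1) : Int) % M * ((Nat.fib (m + 1) : Int) % M)) M
          = (Nat.fib (2 * m + 1) : Int) % M := by
        rw [PySem.Int.mod_eq_emod_of_pos hMpos, hfib21]
        exact (hma.mul hma).add (hmb.mul hmb)
      rcases Nat.mod_two_eq_zero_or_one k with hpar | hpar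
      · have hk : k = 2 * m := by omega
        simp only [hk, hc, hd]
        rw [if_pos (by omega : 2 * m % 2 = 0)]
      · have hk : k = 2 * m + 1 := by omega
        have hfib3 : Nat.fib (2 * m + 1 + 1) = Nat.fib (2 * m) + Nat.fib (2 * m + 1) :=
          Nat.fib_add_two
        simp only [hk, hc, hd]
        rw [if_neg (by omega : ¬ (2 * m + 1) % 2 = 0)]
        refine Prod.ext rfl ?_
        rw [PySem.Int.mod_eq_emod_of_pos hMpos, hfib3]
        push_cast
        exact (Int.mod_modEq _ _).add (Int.mod_modEq _ _)

-- a.getD i d reads a[i] when i is in range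
theorem agetD (a : Array Int) (i : Nat) (h : i < a.size) (d : Int) : a.getD i d = a[i] := by
  simp [Array.getD, h]

theorem loop_inv (N : Nat) (h2 : 2 ≤ N) (m : Nat) (hm : m ≤ N - 2) :
    ((PySem.List.pyRange 3 (3 + (m : Int)) 1).foldl
      (fun a i => a.setIfInBounds i.toNat (a.getD (i - 1).toNat 0 + a.getD (i - 2).toNat 0))
      ((((Array.replicate (N + 1) (0 : Int)).setIfInBounds 0 0).setIfInBounds 1 1).setIfInBounds 2 2)).size = N + 1 ∧
    ∀ i : Nat, i ≤ m + 2 →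
      ((PySem.List.pyRange 3 (3 + (m : Int)) 1).foldl
        (fun a i => a.setIfInBounds i.toNat (a.getD (i - 1).toNat 0 + a.getD (i - 2).toNat 0))
        ((((Array.replicate (N + 1) (0 : Int)).setIfInBounds 0 0).setIfInBounds 1 1).setIfInBounds 2 2)).getD i 0 = fibV i := by
  induction m with
  | zero =>
    have hr : PySem.List.pyRange 3 (3 + ((0 : Nat) : Int)) 1 = [] := by
      norm_num [PySem.List.pyRange_one]
    rw [hr]
    simp only [List.foldl_nil]
    refine ⟨by simp, ?_⟩
    intro i hi
    interval_cases i
    · rw [agetD _ _ (by simp only [Array.size_setIfInBounds, Array.size_replicate]; omega)]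
      rw [Array.getElem_setIfInBounds_ne (by simp only [Array.size_setIfInBounds, Array.size_replicate]; omega) (by omega),
          Array.getElem_setIfInBounds_ne (by simp only [Array.size_setIfInBounds, Array.size_replicate]; omega) (by omega),
          Array.getElem_setIfInBounds_self]
      simp [fibV]
    · rw [agetD _ _ (by simp only [Array.size_setIfInBounds, Array.size_replicate]; omega)]
      rw [Array.getElem_setIfInBounds_ne (by simp only [Array.size_setIfInBounds, Array.size_replicate]; omega) (by omega),
          Array.getElem_setIfInBounds_self]
      simp [fibV]
    · rw [agetD _ _ (by simp only [Array.size_setIfInBounds, Array.size_replicate]; omega)]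
      rw [Array.getElem_setIfInBounds_self]
      simp [fibV, Nat.fib]
  | succ m ih =>
    have hm' : m ≤ N - 2 := by omega
    obtain ⟨hlen, hval⟩ := ih hm'
    have hr : PySem.List.pyRange 3 (3 + ((m + 1 : Nat) : Int)) 1 =
        PySem.List.pyRange 3 (3 + (m : Int)) 1 ++ [3 + (m : Int)] := by
      have : (3 : Int) + ((m + 1 : Nat) : Int) = (3 + (m : Int)) + 1 := by push_cast; ring
      rw [this, PySem.List.pyRange_one_succ_right (by omega)]
    rw [hr, List.foldl_append]
    set L := (PySem.List.pyRange 3 (3 + (m : Int)) 1).foldl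
      (fun a i => a.setIfInBounds i.toNat (a.getD (i - 1).toNat 0 + a.getD (i - 2).toNat 0))
      ((((Array.replicate (N + 1) (0 : Int)).setIfInBounds 0 0).setIfInBounds 1 1).setIfInBounds 2 2) with hL
    simp only [List.foldl_cons, List.foldl_nil]
    -- evaluate the two reads
    have e1 : ((3 + (m : Int)) - 1).toNat = 2 + m := by omega
    have e2 : ((3 + (m : Int)) - 2).toNat = 1 + m := by omega
    have et : (3 + (m : Int)).toNat = 3 + m := by omega
    have hv1 : L.getD ((3 + (m : Int)) - 1).toNat 0 = (Nat.fib (m + 3) : Int) := by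
      rw [e1, hval (2 + m) (by omega)]
      simp only [fibV, if_neg (show ¬(2 + m = 0) by omega)]
      have h23 : 2 + m + 1 = m + 3 := by omega
      rw [h23]
    have hv2 : L.getD ((3 + (m : Int)) - 2).toNat 0 = (Nat.fib (m + 2) : Int) := by
      rw [e2, hval (1 + m) (by omega)]
      simp only [fibV, if_neg (show ¬(1 + m = 0) by omega)]
      have h12 : 1 + m + 1 = m + 2 := by omega
      rw [h12]
    rw [hv1, hv2, et]
    have hsum : (Nat.fib (m + 3) : Int) + (Nat.fib (m + 2) : Int) = (Nat.fib (m + 4) : Int) := by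
      have : Nat.fib (m + 4) = Nat.fib (m + 2) + Nat.fib (m + 3) := Nat.fib_add_two
      push_cast [this]; ring
    rw [hsum]
    have hlt : 3 + m < N + 1 := by omega
    refine ⟨by simp [Array.size_setIfInBounds, hlen], ?_⟩
    intro i hi
    by_cases hi3 : i = 3 + m
    · subst hi3
      rw [agetD _ _ (by simp only [Array.size_setIfInBounds, hlen]; omega)]
      rw [Array.getElem_setIfInBounds_self]
      simp [fibV, show 3 + m + 1 = m + 4 by omega]
    · have hile : i ≤ m + 2 := by omega
      rw [agetD _ _ (by simp only [Array.size_setIfInBounds, hlen]; omega)]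
      rw [Array.getElem_setIfInBounds_ne (by omega) (by omega)]
      rw [← agetD _ _ (by omega)]
      exact hval i hile

theorem solution_eq_fib (N : Nat) (h2 : 2 ≤ N) :
    solution (N : Int) = (Nat.fib (N + 1) : Int) % 1234567 := by
  have hne : (((N : Int) == 1 || (N : Int) == 0)) = false := by
    simp only [Bool.or_eq_false_iff, beq_eq_false_iff_ne, ne_eq]
    constructor <;> omega
  unfold solution
  rw [hne]
  simp only [Bool.false_eq_true, if_false]
  have ht : ((N : Int) + 1).toNat = N + 1 := by omega
  have hb : (N : Int) + 1 = 3 + ((N - 2 : Nat) : Int) := by omega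
  rw [ht, hb]
  obtain ⟨hlen, hval⟩ := loop_inv N h2 (N - 2) le_rfl
  have htN : ((N : Int)).toNat = N := by omega
  rw [htN, hval N (by omega)]
  rw [PySem.Int.mod_eq_emod_of_pos (by norm_num)]
  simp [fibV, show N ≠ 0 by omega]

-- ===== VERDICT (by name: the statement is the Claim_ definition above) =====
theorem solution_spec : Claim_equal_solution := by
  intro n _ hpre
  unfold Spec_solution solution_alt
  by_cases h01 : n == 1 || n == 0
  · simp only [h01, if_pos]
    unfold solution
    simp [h01]
  · have hn2 : 2 ≤ n := by
      simp only [beq_iff_eq, Bool.or_eq_true, not_or] at h01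
      unfold Pre_solution at hpre
      omega
    obtain ⟨N, rfl⟩ : ∃ N : Nat, n = (N : Int) := ⟨n.toNat, by omega⟩
    have hN : 2 ≤ N := by exact_mod_cast hn2
    simp only [h01, if_neg, Bool.false_eq_true, not_false_iff]
    rw [solution_eq_fib N hN, fibPair_eq]
    have : ((N : Int) + 1).toNat = N + 1 := by omega
    rw [this]
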